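-- pv_equiv track=rewrite | github.com/OpenGPTs-platform/assistants-api | run_executor_worker/src/agents/coala.py | strip_generated_react_step
-- ===== SOURCE A (Python) =====
-- from enum import Enum
-- from typing import Optional, List
--
-- class ReactStepType(str, Enum):
--     ACTION = "Action"
--     THOUGHT = "Thought"
--     OBSERVATION = "Observation"
--     QUESTION = "Question"
--     FINAL_ANSWER = "Final Answer"
--
-- def strip_generated_react_step(
--     generation, start_key: str, runon_str: Optional[str] = None
-- ) -> str:
--     # TODO: deprecate this once there is no run on step generation
--     try:
--         stripped_generation = generation.split(start_key, 1)[1].strip()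
--     except IndexError:
--         raise ValueError(
--             "Generation did not follow ReAct format:\n"
--             + generation
--             + "\n"
--             + start_key
--         )
--
--     for step_type in ReactStepType:
--         stripped_generation = stripped_generation.split(
--             step_type.value + ":", 1
--         )[0].strip()
--
--     return stripped_generation
-- ===== SOURCE B (Python) =====
-- from typing import Optional
--
-- _MARKERS = ("Action:", "Thought:", "Observation:", "Question:", "Final Answer:")
--
--
-- def strip_generated_react_step(
--     generation, start_key: str, runon_str: Optional[str] = None
-- ) -> str:
--     i = generation.find(start_key)
--     if i < 0:
--         raise ValueError(
--             "Generation did not follow ReAct format:\n"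
--             + generation
--             + "\n"
--             + start_key
--         )
--     s = generation[i + len(start_key):].strip()
--     hits = [p for p in (s.find(m) for m in _MARKERS) if p >= 0]
--     return s[:min(hits, default=len(s))].strip()
-- ===== Notes on version B (the rewrite author's own statement) =====
-- stated objective: alternative
-- what changed: A repeatedly re-splits and re-strips a shrinking string once per ReAct marker (each step depends on the previous string); B locates the header with find and slices past it once, then collects the marker find positions in one comprehension, cuts at their minimum (default: whole string) and strips once.
import Mathlib
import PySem

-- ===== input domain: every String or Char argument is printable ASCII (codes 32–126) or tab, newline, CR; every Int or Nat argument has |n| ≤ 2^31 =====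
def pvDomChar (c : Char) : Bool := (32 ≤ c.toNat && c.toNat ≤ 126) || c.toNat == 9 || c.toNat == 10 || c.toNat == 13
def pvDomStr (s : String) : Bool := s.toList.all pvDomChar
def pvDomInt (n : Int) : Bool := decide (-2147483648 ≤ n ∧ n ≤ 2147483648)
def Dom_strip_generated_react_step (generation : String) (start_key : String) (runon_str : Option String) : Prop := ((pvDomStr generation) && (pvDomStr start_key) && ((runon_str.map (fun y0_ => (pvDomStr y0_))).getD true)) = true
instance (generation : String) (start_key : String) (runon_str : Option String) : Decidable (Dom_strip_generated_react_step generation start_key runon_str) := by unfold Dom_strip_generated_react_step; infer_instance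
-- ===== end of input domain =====

-- B replaces A's dependent chain of five split-and-strip rewrites of a shrinking string by a
-- find-and-slice header extraction followed by one comprehension of marker find positions whose
-- minimum (default: the whole string) is the single cut point (alternative decomposition).

-- ===== PORT A =====
-- the five ReactStepType enum values, in enum order
def pvStepKeys : List String := ["Action", "Thought", "Observation", "Question", "Final Answer"]

def strip_generated_react_step (generation : String) (start_key : String) (runon_str : Option String) : String :=
  match PySem.Str.splitMax? generation start_key 1 with
  | none => ""        -- Python: ValueError 'empty separator' (excluded by Pre_)
  | some parts =>
    match parts[1]? with
    | none => ""      -- Python: IndexError caught, ValueError raised (excluded by Pre_)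
    | some g1 =>
      pvStepKeys.foldl
        (fun t v =>
          PySem.Str.strip (((PySem.Str.splitMax? t (v ++ ":") 1).getD []).headD ""))
        (PySem.Str.strip g1)

-- ===== PORT B =====
def pvMarkers : List String := ["Action:", "Thought:", "Observation:", "Question:", "Final Answer:"]

def strip_generated_react_step_alt (generation : String) (start_key : String) (runon_str : Option String) : String :=
  let i := PySem.Str.find generation start_key
  if i < 0 then ""    -- Python: raise ValueError (excluded by Pre_)
  else
    let s := PySem.Str.strip (PySem.Str.slice generation (some (i + PySem.Str.len start_key)) none)
    let hits := (pvMarkers.map (fun m => PySem.Str.find s m)).filter (fun p => decide (0 ≤ p))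
    PySem.Str.strip (PySem.Str.slice s none (some ((PySem.List.min? hits (fun p => p)).getD (PySem.Str.len s))))

-- ===== PRECONDITION & SPEC =====
-- Pre_ excludes exactly the inputs on which the Python A raises: an empty start_key
-- (ValueError 'empty separator' from str.split) and a start_key absent from generation
-- (IndexError turned into A's explicit ValueError).
def Pre_strip_generated_react_step (generation : String) (start_key : String) (runon_str : Option String) : Prop :=
  start_key ≠ "" ∧ PySem.Str.isIn start_key generation = true
instance (generation : String) (start_key : String) (runon_str : Option String) : Decidable (Pre_strip_generated_react_step generation start_key runon_str) := by unfold Pre_strip_generated_react_step; infer_instance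

def pvWitness_strip_generated_react_step : String × String × Option String :=
  ("Thought: think hard\nAction: go", "Thought:", none)

def Spec_strip_generated_react_step (generation : String) (start_key : String) (runon_str : Option String) (out : String) : Prop := out = strip_generated_react_step_alt generation start_key runon_str
instance (generation : String) (start_key : String) (runon_str : Option String) (out : String) : Decidable (Spec_strip_generated_react_step generation start_key runon_str out) := by unfold Spec_strip_generated_react_step; infer_instance

-- ===== CLAIM (what is proved, stated in full; the proofs are below) =====
def Claim_equal_strip_generated_react_step : Prop := ∀ (generation : String) (start_key : String) (runon_str : Option String), Dom_strip_generated_react_step generation start_key runon_str → Pre_strip_generated_react_step generation start_key runon_str → Spec_strip_generated_react_step generation start_key runon_str (strip_generated_react_step generation start_key runon_str)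

-- ===== LEMMAS AND PROOFS =====

def pvFo (m : List Char) : List Char → Option Nat
  | [] => none
  | c :: t => if m.isPrefixOf (c :: t) then some 0 else (pvFo m t).map (· + 1)

def pvCut (m l : List Char) : List Char :=
  match pvFo m l with
  | none => l
  | some p => l.take p

def pvMinF (ms : List (List Char)) (l : List Char) (a : Nat) : Nat :=
  ms.foldl (fun c m => match pvFo m l with | none => c | some p => min p c) a
theorem pvFo_eq_none_iff (m : List Char) (hm : m ≠ []) (l : List Char) :
    pvFo m l = none ↔ ∀ i, ¬ m <+: l.drop i := by
  induction l with
  | nil =>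
    simp only [pvFo, true_iff]
    intro i h
    rw [List.drop_nil] at h
    exact hm (List.prefix_nil.mp h)
  | cons c t ih =>
    simp only [pvFo]
    by_cases hp : m.isPrefixOf (c :: t)
    · rw [if_pos hp]
      constructor
      · intro h; exact absurd h (by simp)
      · intro h
        exact absurd (by simpa using List.isPrefixOf_iff_prefix.mp hp) (h 0)
    · have hnp : ¬ m <+: (c :: t) := fun hc => hp (List.isPrefixOf_iff_prefix.mpr hc)
      rw [if_neg hp]; rw [Option.map_eq_none_iff, ih]
      constructor
      · intro h i
        cases i with
        | zero => simpa using hnp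
        | succ j => simpa using h j
      · intro h i
        simpa using h (i + 1)

theorem pvFo_eq_some_iff (m : List Char) (hm : m ≠ []) (l : List Char) (p : Nat) :
    pvFo m l = some p ↔ (m <+: l.drop p ∧ ∀ i < p, ¬ m <+: l.drop i) := by
  induction l generalizing p with
  | nil =>
    simp only [pvFo, List.drop_nil]
    constructor
    · intro h; cases h
    · rintro ⟨h1, -⟩; exact absurd (List.prefix_nil.mp h1) hm
  | cons c t ih =>
    simp only [pvFo]
    by_cases hp : m.isPrefixOf (c :: t)
    · have hyes : m <+: (c :: t) := List.isPrefixOf_iff_prefix.mp hp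
      rw [if_pos hp]
      constructor
      · intro h
        have hp0 : p = 0 := by simpa using h.symm
        subst hp0
        exact ⟨by simpa using hyes, by omega⟩
      · rintro ⟨h1, h2⟩
        by_contra hne
        have hppos : 0 < p := by
          rcases Nat.eq_zero_or_pos p with h | h
          · exact absurd (by simp [h]) (fun hc : some 0 = some p => hne hc)
          · exact h
        exact h2 0 hppos (by simpa using hyes)
    · have hnp : ¬ m <+: (c :: t) := fun hc => hp (List.isPrefixOf_iff_prefix.mpr hc)
      rw [if_neg hp]
      rcases p with _ | q
      ·
        simp only [List.drop_zero]
        constructor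
        · intro h
          obtain ⟨r, hr, hrq⟩ := Option.map_eq_some_iff.mp h
          omega
        · rintro ⟨h1, _⟩
          exact absurd h1 hnp
      · constructor
        · intro h
          obtain ⟨r, hr, hrq⟩ := Option.map_eq_some_iff.mp h
          have hrq' : r = q := by omega
          subst hrq'
          obtain ⟨h1, h2⟩ := (ih r).mp hr
          refine ⟨by simpa using h1, ?_⟩
          intro i hi
          cases i with
          | zero => simpa using hnp
          | succ j => simpa using h2 j (by omega)
        · rintro ⟨h1, h2⟩
          have hft : pvFo m t = some q := by
            rw [ih q]
            refine ⟨by simpa using h1, ?_⟩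
            intro j hj
            simpa using h2 (j + 1) (by omega)
          simp [hft]

theorem pvFo_some_bound (m : List Char) (hm : m ≠ []) (l : List Char) (p : Nat)
    (h : pvFo m l = some p) : p + m.length ≤ l.length := by
  obtain ⟨h1, -⟩ := (pvFo_eq_some_iff m hm l p).mp h
  have hlen := h1.length_le
  simp only [List.length_drop] at hlen
  have hml : 0 < m.length := List.length_pos_of_ne_nil hm
  omega
theorem pvFind_go (m : List Char) (hm : m ≠ []) : ∀ (l : List Char) (k : Nat),
    PySem.Chars.find.go m l k = (match pvFo m l with | none => -1 | some p => ((p : Int) + k)) := by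
  intro l
  induction l with
  | nil =>
    intro k
    rw [PySem.Chars.find.go]
    simp [pvFo, List.isEmpty_iff, hm]
  | cons c t ih =>
    intro k
    rw [PySem.Chars.find.go]
    by_cases hp : m.isPrefixOf (c :: t)
    · simp [pvFo, hp]
    · rw [if_neg hp, ih (k+1)]
      simp only [pvFo]
      rw [if_neg hp]
      cases hfo : pvFo m t with
      | none => simp
      | some p => simp; push_cast; ring

theorem pvFind_none (m l : List Char) (hm : m ≠ []) (h : pvFo m l = none) :
    PySem.Chars.find l m = -1 := by
  rw [PySem.Chars.find, pvFind_go m hm l 0, h]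

theorem pvFind_some (m l : List Char) (hm : m ≠ []) (p : Nat) (h : pvFo m l = some p) :
    PySem.Chars.find l m = (p : Int) := by
  rw [PySem.Chars.find, pvFind_go m hm l 0, h]
  simp

theorem pvGoZero (sep : List Char) (fuel : Nat) (l cur : List Char) (acc : List (List Char)) :
    PySem.Chars.splitOnMax.go sep fuel 0 l cur acc = ((cur.reverse ++ l) :: acc).reverse := by
  cases fuel with
  | zero => rw [PySem.Chars.splitOnMax.go]
  | succ f =>
    cases l with
    | nil => rw [PySem.Chars.splitOnMax.go] <;> simp
    | cons c t => rw [PySem.Chars.splitOnMax.go]; simp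

theorem pvGoOne (sep : List Char) : ∀ (l : List Char) (fuel : Nat) (cur : List Char) (acc : List (List Char)),
    l.length < fuel →
    PySem.Chars.splitOnMax.go sep fuel 1 l cur acc =
      acc.reverse ++ [cur.reverse ++ pvCut sep l] ++
        (match pvFo sep l with | none => [] | some p => [l.drop (p + sep.length)]) := by
  intro l
  induction l with
  | nil =>
    intro fuel cur acc hf
    cases fuel with
    | zero => omega
    | succ f =>
      rw [PySem.Chars.splitOnMax.go] <;> simp [pvFo, pvCut]
  | cons c t ih =>
    intro fuel cur acc hf
    cases fuel with
    | zero => omega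
    | succ f =>
      rw [PySem.Chars.splitOnMax.go]
      by_cases hp : sep.isPrefixOf (c :: t)
      · rw [if_neg (by omega : ¬ (1 : Nat) = 0), if_pos hp]
        rw [pvGoZero]
        simp [pvCut, pvFo, hp]
      · rw [if_neg (by omega : ¬ (1 : Nat) = 0), if_neg hp]
        rw [ih f (c :: cur) acc (by simpa using Nat.lt_of_succ_lt_succ hf)]
        simp only [pvFo, pvCut]
        rw [if_neg hp]
        cases hfo : pvFo sep t with
        | none => simp
        | some p =>
          simp
          rw [(by omega : p + 1 + sep.length = (p + sep.length) + 1), List.drop_succ_cons]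
theorem pvDropWhileHead (p : Char → Bool) (l : List Char) (c : Char) (t : List Char)
    (h : l.dropWhile p = c :: t) : p c = false := by
  induction l with
  | nil => simp at h
  | cons a l' ih =>
    rw [List.dropWhile_cons] at h
    by_cases ha : p a
    · exact ih (by simpa [ha] using h)
    · rw [if_neg ha] at h
      cases h; simpa using ha

-- ===== strip lemmas =====
theorem pvRstripDecomp (u : List Char) :
    u = PySem.Chars.rstrip u ++ (u.reverse.takeWhile PySem.Chars.isspace).reverse := by
  rw [PySem.Chars.rstrip]
  rw [← List.reverse_append, List.takeWhile_append_dropWhile, List.reverse_reverse]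

theorem pvWsTail (u : List Char) :
    ∀ c ∈ (u.reverse.takeWhile PySem.Chars.isspace).reverse, PySem.Chars.isspace c = true := by
  intro c hc
  exact List.mem_takeWhile_imp (List.mem_reverse.mp hc)

theorem pvRstripPrefix (u : List Char) : PySem.Chars.rstrip u <+: u :=
  ⟨(u.reverse.takeWhile PySem.Chars.isspace).reverse, (pvRstripDecomp u).symm⟩

theorem pvStripFixLstrip (s : List Char) (h : PySem.Chars.strip s = s) :
    PySem.Chars.lstrip s = s := by
  have h1 : (PySem.Chars.lstrip s).length ≤ s.length :=
    (List.dropWhile_suffix _).length_le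
  have h2 : s.length ≤ (PySem.Chars.lstrip s).length := by
    conv_lhs => rw [← h]
    exact (pvRstripPrefix (PySem.Chars.lstrip s)).length_le
  exact List.IsSuffix.eq_of_length (List.dropWhile_suffix _) (by omega)

theorem pvLstripTake (s : List Char) (h : PySem.Chars.lstrip s = s) (p : Nat) :
    PySem.Chars.lstrip (s.take p) = s.take p := by
  cases s with
  | nil => simp [PySem.Chars.lstrip]
  | cons a t =>
    have ha : PySem.Chars.isspace a = false := by
      rw [PySem.Chars.lstrip] at h
      exact pvDropWhileHead _ _ _ _ h
    cases p with
    | zero => simp [PySem.Chars.lstrip]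
    | succ q =>
      rw [List.take_succ_cons, PySem.Chars.lstrip, List.dropWhile_cons, ha]
      simp

theorem pvStripTake (s : List Char) (hs : PySem.Chars.strip s = s) (p : Nat) :
    PySem.Chars.strip (s.take p) = PySem.Chars.rstrip (s.take p) := by
  rw [PySem.Chars.strip, pvLstripTake s (pvStripFixLstrip s hs) p]

theorem pvRstripIdem (u : List Char) :
    PySem.Chars.rstrip (PySem.Chars.rstrip u) = PySem.Chars.rstrip u := by
  rw [PySem.Chars.rstrip, PySem.Chars.rstrip, List.reverse_reverse]
  congr 1
  cases h : u.reverse.dropWhile PySem.Chars.isspace with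
  | nil => simp
  | cons c t =>
    rw [List.dropWhile_cons, pvDropWhileHead _ _ _ _ h]
    simp

theorem pvStripIdem (s : List Char) :
    PySem.Chars.strip (PySem.Chars.strip s) = PySem.Chars.strip s := by
  rw [PySem.Chars.strip, PySem.Chars.strip]
  have hl : PySem.Chars.lstrip (PySem.Chars.rstrip (PySem.Chars.lstrip s))
      = PySem.Chars.rstrip (PySem.Chars.lstrip s) := by
    cases h : PySem.Chars.rstrip (PySem.Chars.lstrip s) with
    | nil => simp [PySem.Chars.lstrip]
    | cons c t =>
      have hpre := pvRstripPrefix (PySem.Chars.lstrip s)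
      rw [h] at hpre
      obtain ⟨r, hr⟩ := hpre
      have hc : PySem.Chars.isspace c = false := by
        apply pvDropWhileHead PySem.Chars.isspace s c (t ++ r)
        rw [← List.cons_append]
        exact hr ▸ rfl
      rw [PySem.Chars.lstrip, List.dropWhile_cons, hc]
      simp
  rw [hl, pvRstripIdem]

-- ===== strip-take decomposition =====
theorem pvStripTakeDecomp (s : List Char) (hs : PySem.Chars.strip s = s) (p : Nat) :
    ∃ b, b ≤ p ∧ PySem.Chars.strip (s.take p) = s.take b ∧
      (∀ i, b ≤ i → i < p → ∀ (hi : i < s.length), PySem.Chars.isspace s[i] = true) := by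
  set u := s.take p with hu
  have hst : PySem.Chars.strip u = PySem.Chars.rstrip u := pvStripTake s hs p
  have hpre : PySem.Chars.rstrip u <+: u := pvRstripPrefix u
  set b := (PySem.Chars.rstrip u).length with hb
  have hble : b ≤ p := by
    have h1 := hpre.length_le
    rw [← hb] at h1
    have h2 : u.length ≤ p := by rw [hu, List.length_take]; omega
    omega
  refine ⟨b, hble, ?_, ?_⟩
  · rw [hst, List.prefix_iff_eq_take.mp hpre, ← hb, hu, List.take_take]
    congr 1
    omega
  · intro i hbi hip hi
    have hiu : i < u.length := by simp [hu]; omega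
    have hsu : s[i] = u[i]'hiu := by simp [hu]
    rw [hsu]
    set w := (u.reverse.takeWhile PySem.Chars.isspace).reverse with hw
    have hdec : u = PySem.Chars.rstrip u ++ w := pvRstripDecomp u
    have hx : u[i]'hiu = (PySem.Chars.rstrip u ++ w)[i]'(hdec ▸ hiu) :=
      List.getElem_of_eq hdec hiu
    rw [hx, List.getElem_append_right (by simp only [← hu, ← hb]; exact hbi)]
    exact pvWsTail u _ (List.getElem_mem _)

-- ===== occurrences in a prefix =====
theorem pvOccTake (m : List Char) (hm : m ≠ []) (l : List Char) (k i : Nat) :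
    m <+: (l.take k).drop i ↔ (m <+: l.drop i ∧ i + m.length ≤ k) := by
  have hml : 0 < m.length := List.length_pos_of_ne_nil hm
  rw [List.drop_take, List.prefix_take_iff]
  constructor
  · rintro ⟨h1, h2⟩; exact ⟨h1, by omega⟩
  · rintro ⟨h1, h2⟩; exact ⟨h1, by omega⟩

-- ===== running-minimum fold lemmas =====
def pvMinStep (l : List Char) (c : Nat) (m : List Char) : Nat :=
  match pvFo m l with | none => c | some p => min p c

theorem pvMinStep_none (l : List Char) (c : Nat) (m : List Char) (h : pvFo m l = none) :
    pvMinStep l c m = c := by rw [pvMinStep, h]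

theorem pvMinStep_some (l : List Char) (c : Nat) (m : List Char) (p : Nat) (h : pvFo m l = some p) :
    pvMinStep l c m = min p c := by rw [pvMinStep, h]

theorem pvMinF_cons (m : List Char) (ms : List (List Char)) (l : List Char) (a : Nat) :
    pvMinF (m :: ms) l a = pvMinF ms l (pvMinStep l a m) := rfl

theorem pvMinF_min (ms : List (List Char)) (l : List Char) :
    ∀ x y, pvMinF ms l (min x y) = min x (pvMinF ms l y) := by
  induction ms with
  | nil => intro x y; simp [pvMinF]
  | cons m rest ih =>
    intro x y
    rw [pvMinF_cons, pvMinF_cons]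
    cases hfo : pvFo m l with
    | none => rw [pvMinStep_none l _ m hfo, pvMinStep_none l _ m hfo]; exact ih x y
    | some p =>
      rw [pvMinStep_some l _ m p hfo, pvMinStep_some l _ m p hfo]
      rw [(by omega : min p (min x y) = min x (min p y))]
      exact ih x (min p y)

theorem pvMinF_le (ms : List (List Char)) (l : List Char) : ∀ a, pvMinF ms l a ≤ a := by
  induction ms with
  | nil => intro a; simp [pvMinF]
  | cons m rest ih =>
    intro a
    rw [pvMinF_cons]
    cases hfo : pvFo m l with
    | none => rw [pvMinStep_none l _ m hfo]; exact ih a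
    | some p =>
      rw [pvMinStep_some l _ m p hfo]
      have := ih (min p a)
      omega

theorem pvMinF_attain (ms : List (List Char)) (l : List Char) :
    ∀ a, pvMinF ms l a = a ∨ ∃ m ∈ ms, pvFo m l = some (pvMinF ms l a) := by
  induction ms with
  | nil => intro a; left; simp [pvMinF]
  | cons m rest ih =>
    intro a
    rw [pvMinF_cons]
    cases hfo : pvFo m l with
    | none =>
      rw [pvMinStep_none l _ m hfo]
      rcases ih a with h | ⟨m', hm', h⟩
      · left; exact h
      · right; exact ⟨m', List.mem_cons_of_mem _ hm', h⟩
    | some p =>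
      rw [pvMinStep_some l _ m p hfo]
      rcases ih (min p a) with h | ⟨m', hm', h⟩
      · rcases Nat.le_total p a with hpa | hpa
        · right
          refine ⟨m, List.mem_cons_self, ?_⟩
          rw [hfo, h]
          congr 1
          omega
        · left; omega
      · right; exact ⟨m', List.mem_cons_of_mem _ hm', h⟩

theorem pvMinF_le_of_mem (ms : List (List Char)) (l : List Char) (m : List Char)
    (hm : m ∈ ms) (p : Nat) (h : pvFo m l = some p) : ∀ a, pvMinF ms l a ≤ p := by
  induction ms with
  | nil => simp at hm
  | cons m0 rest ih =>
    intro a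
    rw [pvMinF_cons]
    rcases List.mem_cons.mp hm with rfl | hm'
    · rw [pvMinStep_some l _ m p h]
      have := pvMinF_le rest l (min p a)
      omega
    · cases hfo : pvFo m0 l with
      | none => rw [pvMinStep_none l _ m0 hfo]; exact ih hm' a
      | some q => rw [pvMinStep_some l _ m0 q hfo]; exact ih hm' (min q a)

theorem pvMinF_all_none (ms : List (List Char)) (l : List Char)
    (h : ∀ m ∈ ms, pvFo m l = none) : ∀ a, pvMinF ms l a = a := by
  induction ms with
  | nil => intro a; simp [pvMinF]
  | cons m rest ih =>
    intro a
    rw [pvMinF_cons, pvMinStep_none l _ m (h m List.mem_cons_self)]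
    exact ih (fun m' hm' => h m' (List.mem_cons_of_mem _ hm')) a

theorem pvMinF_lb (ms : List (List Char)) (l : List Char) (L : Nat)
    (h1 : ∀ m ∈ ms, ∀ p, pvFo m l = some p → L ≤ p) :
    ∀ a, L ≤ a → L ≤ pvMinF ms l a := by
  induction ms with
  | nil => intro a h2; simpa [pvMinF] using h2
  | cons m rest ih =>
    intro a h2
    rw [pvMinF_cons]
    cases hfo : pvFo m l with
    | none =>
      rw [pvMinStep_none l _ m hfo]
      exact ih (fun m' hm' => h1 m' (List.mem_cons_of_mem _ hm')) a h2
    | some p =>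
      rw [pvMinStep_some l _ m p hfo]
      have hLp := h1 m List.mem_cons_self p hfo
      exact ih (fun m' hm' => h1 m' (List.mem_cons_of_mem _ hm')) (min p a) (by omega)

-- ===== marker hypotheses =====
def pvGood (m : List Char) : Bool :=
  !m.isEmpty && m.head?.all (fun c => !PySem.Chars.isspace c) &&
    m.getLast?.all (fun c => !PySem.Chars.isspace c)

def pvNoOv (m1 m2 : List Char) : Bool :=
  (List.range m1.length).all
    (fun d => d == 0 || (!(m1.drop d).isPrefixOf m2 && !m2.isPrefixOf (m1.drop d)))

theorem pvGoodNe (m : List Char) (hg : pvGood m = true) : m ≠ [] := by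
  rw [pvGood] at hg
  simp only [Bool.and_eq_true, Bool.not_eq_true'] at hg
  exact fun h => by simp [h] at hg

theorem pvGoodHead (m : List Char) (hg : pvGood m = true) (c : Char) (t : List Char)
    (h : m = c :: t) : PySem.Chars.isspace c = false := by
  rw [pvGood] at hg
  subst h
  simp only [Bool.and_eq_true, List.head?_cons, Option.all_some, Bool.not_eq_true'] at hg
  exact hg.1.2

theorem pvGoodLastElem (m : List Char) (hg : pvGood m = true) (h : 0 < m.length) :
    PySem.Chars.isspace (m[m.length - 1]'(by omega)) = false := by
  rw [pvGood] at hg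
  simp only [Bool.and_eq_true] at hg
  have hl := hg.2
  rw [List.getLast?_eq_getElem?, List.getElem?_eq_getElem (by omega)] at hl
  simpa using hl

theorem pvNoOvSpec (m1 m2 : List Char) (h : pvNoOv m1 m2 = true) (d : Nat)
    (h1 : 0 < d) (h2 : d < m1.length) :
    ¬ (m1.drop d <+: m2) ∧ ¬ (m2 <+: m1.drop d) := by
  rw [pvNoOv, List.all_eq_true] at h
  have := h d (List.mem_range.mpr h2)
  simp only [Bool.or_eq_true, beq_iff_eq, Bool.and_eq_true, Bool.not_eq_true'] at this
  rcases this with h0 | ⟨ha, hb⟩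
  · omega
  · constructor
    · intro hc; rw [List.isPrefixOf_iff_prefix.mpr hc] at ha; cases ha
    · intro hc; rw [List.isPrefixOf_iff_prefix.mpr hc] at hb; cases hb

theorem pvOccElem (m s : List Char) (q j : Nat) (hocc : m <+: s.drop q) (hj : j < m.length)
    (hq : q + j < s.length) : s[q + j] = m[j] := by
  have hjd : j < (s.drop q).length := by simp [List.length_drop]; omega
  have h1 : m[j] = (s.drop q)[j]'hjd := List.IsPrefix.getElem hocc hj
  rw [h1, List.getElem_drop]

theorem pvOccHead (m s : List Char) (q : Nat) (hocc : m <+: s.drop q) (c : Char) (t : List Char)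
    (hm : m = c :: t) (hq : q < s.length) : s[q] = c := by
  have := pvOccElem m s q 0 hocc (by simp [hm]) (by omega)
  simpa [hm] using this

-- first occurrence in s bounds any occurrence position
theorem pvFoMin (m : List Char) (hm : m ≠ []) (s : List Char) (r : Nat)
    (hocc : m <+: s.drop r) : ∃ r0, pvFo m s = some r0 ∧ r0 ≤ r := by
  cases hfo : pvFo m s with
  | none => exact absurd hocc ((pvFo_eq_none_iff m hm s).mp hfo r)
  | some r0 =>
    refine ⟨r0, rfl, ?_⟩
    by_contra h
    exact ((pvFo_eq_some_iff m hm s r0).mp hfo).2 r (by omega) hocc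

-- ===== the main chain theorem =====
theorem pvChain : ∀ (ms : List (List Char)),
    (∀ m ∈ ms, pvGood m = true) → (∀ m1 ∈ ms, ∀ m2 ∈ ms, pvNoOv m1 m2 = true) →
    ∀ s : List Char, PySem.Chars.strip s = s →
    ms.foldl (fun t m => PySem.Chars.strip (pvCut m t)) s
      = PySem.Chars.strip (s.take (pvMinF ms s s.length)) := by
  intro ms
  induction ms with
  | nil =>
    intro _ _ s hs
    simp only [List.foldl_nil, pvMinF, List.take_length, hs]
  | cons m rest ih =>
    intro hg hov s hs
    have hg' : ∀ m' ∈ rest, pvGood m' = true := fun m' h => hg m' (List.mem_cons_of_mem _ h)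
    have hov' : ∀ m1 ∈ rest, ∀ m2 ∈ rest, pvNoOv m1 m2 = true :=
      fun m1 h1 m2 h2 => hov m1 (List.mem_cons_of_mem _ h1) m2 (List.mem_cons_of_mem _ h2)
    have hmne : m ≠ [] := pvGoodNe m (hg m List.mem_cons_self)
    have hmlen : 0 < m.length := List.length_pos_of_ne_nil hmne
    rw [List.foldl_cons]
    cases hfo : pvFo m s with
    | none =>
      have hcut : pvCut m s = s := by rw [pvCut, hfo]
      rw [hcut, hs, ih hg' hov' s hs, pvMinF_cons, pvMinStep_none _ _ _ hfo]
    | some p =>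
      have hbound := pvFo_some_bound m hmne s p hfo
      have hps : p < s.length := by omega
      have hocc : m <+: s.drop p := ((pvFo_eq_some_iff m hmne s p).mp hfo).1
      have hcut : pvCut m s = s.take p := by rw [pvCut, hfo]
      rw [hcut]
      obtain ⟨b, hbp, hstb, hgap⟩ := pvStripTakeDecomp s hs p
      have hbs : b ≤ s.length := by omega
      have hlen' : (s.take b).length = b := by rw [List.length_take]; omega
      rw [ih hg' hov' (PySem.Chars.strip (s.take p)) (pvStripIdem _), hstb, hlen']
      rw [pvMinF_cons, pvMinStep_some _ _ _ p hfo,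
        (by omega : min p s.length = min p s.length)]
      have hq : pvMinF rest s (min p s.length) = min p (pvMinF rest s s.length) :=
        pvMinF_min rest s p s.length
      rw [hq]
      set q := pvMinF rest s s.length with hqdef
      -- any occurrence of a rest marker in s.take b yields q ≤ its position
      have hq_le_occ : ∀ m'' ∈ rest, ∀ r, pvFo m'' (s.take b) = some r → q ≤ r := by
        intro m'' hm'' r hfr
        have hm''ne : m'' ≠ [] := pvGoodNe m'' (hg' m'' hm'')
        have hoccr : m'' <+: (s.take b).drop r := ((pvFo_eq_some_iff m'' hm''ne _ r).mp hfr).1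
        have hoccs : m'' <+: s.drop r := ((pvOccTake m'' hm''ne s b r).mp hoccr).1
        obtain ⟨r0, hr0, hr0le⟩ := pvFoMin m'' hm''ne s r hoccs
        have := pvMinF_le_of_mem rest s m'' hm'' r0 hr0 s.length
        omega
      by_cases hqp : q < p
      · -- the minimal rest occurrence survives the cut-and-strip
        rcases pvMinF_attain rest s s.length with hA | ⟨m', hm', hA⟩
        · rw [← hqdef] at hA; omega
        · rw [← hqdef] at hA
          have hgm' := hg' m' hm'
          have hm'ne : m' ≠ [] := pvGoodNe m' hgm'
          have hm'len : 0 < m'.length := List.length_pos_of_ne_nil hm'ne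
          have hocc' : m' <+: s.drop q := ((pvFo_eq_some_iff m' hm'ne s q).mp hA).1
          have hqs : q < s.length := by omega
          obtain ⟨c, t, hct⟩ := List.exists_cons_of_ne_nil hm'ne
          have hqb : q < b := by
            by_contra h
            push_neg at h
            have hws := hgap q h hqp hqs
            rw [pvOccHead m' s q hocc' c t hct hqs] at hws
            rw [pvGoodHead m' hgm' c t hct] at hws
            cases hws
          have hsurv : q + m'.length ≤ b := by
            by_contra h
            push_neg at h
            by_cases hcross : q + m'.length ≤ p
            · have hws := hgap (q + (m'.length - 1)) (by omega) (by omega) (by omega)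
              have hj : m'.length - 1 < m'.length := by omega
              have := pvOccElem m' s q (m'.length - 1) hocc' hj (by omega)
              rw [this] at hws
              rw [pvGoodLastElem m' hgm' hm'len] at hws
              cases hws
            · push_neg at hcross
              have hd1 : 0 < p - q := by omega
              have hd2 : p - q < m'.length := by omega
              have h1 : m'.drop (p - q) <+: s.drop p := by
                have := hocc'.drop (p - q)
                rwa [List.drop_drop, (by omega : q + (p - q) = p)] at this
              have hno := pvNoOvSpec m' m
                (hov m' (List.mem_cons_of_mem _ hm') m List.mem_cons_self) (p - q) hd1 hd2
              rcases List.prefix_or_prefix_of_prefix h1 hocc with h2 | h2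
              · exact hno.1 h2
              · exact hno.2 h2
          have hq'le : pvMinF rest (s.take b) b ≤ q := by
            have hoccb : m' <+: (s.take b).drop q :=
              (pvOccTake m' hm'ne s b q).mpr ⟨hocc', hsurv⟩
            obtain ⟨r0, hr0, hr0le⟩ := pvFoMin m' hm'ne (s.take b) q hoccb
            have := pvMinF_le_of_mem rest (s.take b) m' hm' r0 hr0 b
            omega
          have hq'ge : q ≤ pvMinF rest (s.take b) b :=
            pvMinF_lb rest (s.take b) q hq_le_occ b (by omega)
          have hq' : pvMinF rest (s.take b) b = q := by omega
          rw [hq', List.take_take,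
            (by omega : min q b = q), (by omega : min p q = q)]
      · -- p ≤ q : nothing of rest occurs in the stripped prefix
        push_neg at hqp
        have hnone : ∀ m'' ∈ rest, pvFo m'' (s.take b) = none := by
          intro m'' hm''
          have hm''ne : m'' ≠ [] := pvGoodNe m'' (hg' m'' hm'')
          have hm''len : 0 < m''.length := List.length_pos_of_ne_nil hm''ne
          cases hfr : pvFo m'' (s.take b) with
          | none => rfl
          | some r =>
            have hb := pvFo_some_bound m'' hm''ne (s.take b) r hfr
            rw [hlen'] at hb
            have := hq_le_occ m'' hm'' r hfr
            omega
        rw [pvMinF_all_none rest (s.take b) hnone b, List.take_take,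
          (by omega : min b b = b), (by omega : min p q = p), ← hstb, pvStripIdem]

-- ===== split(sep, 1) characterization =====
theorem pvSplit1 (l sep : List Char) (hsep : sep ≠ []) :
    PySem.Chars.splitOnMax l sep 1 =
      [pvCut sep l] ++ (match pvFo sep l with | none => [] | some p => [l.drop (p + sep.length)]) := by
  rw [PySem.Chars.splitOnMax, if_neg (by omega)]
  have h1 : ((1 : Int)).toNat = 1 := rfl
  rw [h1]
  simpa using pvGoOne sep l (l.length + 1) [] [] (by omega)

theorem pvStepA (t v : String) :
    PySem.Str.strip (((PySem.Str.splitMax? t (v ++ ":") 1).getD []).headD "")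
      = String.ofList (PySem.Chars.strip (pvCut (v.toList ++ [':']) t.toList)) := by
  have hsep : (v ++ ":").toList = v.toList ++ [':'] := by
    rw [String.toList_append]; rfl
  have hne : (v ++ ":").toList ≠ [] := by rw [hsep]; simp
  rw [PySem.Str.splitMax?, PySem.Chars.splitMax?,
    if_neg (by simpa [List.isEmpty_iff] using hne),
    pvSplit1 t.toList _ hne, hsep]
  cases pvFo (v.toList ++ [':']) t.toList with
  | none => simp [PySem.Str.strip, String.toList_ofList]
  | some p => simp [PySem.Str.strip, String.toList_ofList]

theorem pvChainStr (vs : List String) : ∀ l : List Char,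
    vs.foldl (fun t v => PySem.Str.strip (((PySem.Str.splitMax? t (v ++ ":") 1).getD []).headD ""))
        (String.ofList l)
      = String.ofList ((vs.map (fun v => v.toList ++ [':'])).foldl
          (fun t m => PySem.Chars.strip (pvCut m t)) l) := by
  induction vs with
  | nil => intro l; simp
  | cons v vs ih =>
    intro l
    rw [List.foldl_cons, pvStepA, String.toList_ofList, List.map_cons, List.foldl_cons, ih]

-- ===== B-side bridge: hits list, fold of min, cast =====
theorem pvHits (l : List Char) : ∀ ms : List (List Char), (∀ m ∈ ms, m ≠ []) →
    (ms.map (fun m => PySem.Chars.find l m)).filter (fun p => decide (0 ≤ p))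
      = (ms.filterMap (fun m => pvFo m l)).map (fun p : Nat => (p : Int)) := by
  intro ms
  induction ms with
  | nil => intro _; rfl
  | cons m rest ih =>
    intro hne
    have hmne : m ≠ [] := hne m List.mem_cons_self
    have ih' := ih (fun m' h => hne m' (List.mem_cons_of_mem _ h))
    rw [List.map_cons, List.filter_cons, List.filterMap_cons]
    cases hfo : pvFo m l with
    | none =>
      rw [pvFind_none m l hmne hfo]
      simpa using ih'
    | some p =>
      rw [pvFind_some m l hmne p hfo]
      simpa using ih'

theorem pvMinFold (l : List Char) : ∀ (ms : List (List Char)) (a : Nat),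
    pvMinF ms l a = (ms.filterMap (fun m => pvFo m l)).foldl min a := by
  intro ms
  induction ms with
  | nil => intro a; rfl
  | cons m rest ih =>
    intro a
    rw [pvMinF_cons, List.filterMap_cons]
    cases hfo : pvFo m l with
    | none => rw [pvMinStep_none l a m hfo]; exact ih a
    | some p =>
      rw [pvMinStep_some l a m p hfo, List.foldl_cons, Nat.min_comm p a]
      exact ih (min a p)

theorem pvCastFold : ∀ (t : List Nat) (q : Nat),
    (t.map (fun p : Nat => (p : Int))).foldl min ((q : Nat) : Int)
      = ((t.foldl min q : Nat) : Int) := by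
  intro t
  induction t with
  | nil => intro q; rfl
  | cons x t ih =>
    intro q
    rw [List.map_cons, List.foldl_cons, List.foldl_cons, ← Nat.cast_min, ih]

theorem pvPosBound (ms : List (List Char)) (hne : ∀ m ∈ ms, m ≠ []) (l : List Char)
    (p : Nat) (hp : p ∈ ms.filterMap (fun m => pvFo m l)) : p < l.length := by
  obtain ⟨m, hm, hfo⟩ := List.mem_filterMap.mp hp
  have hmne : m ≠ [] := hne m hm
  have := pvFo_some_bound m hmne l p hfo
  have := List.length_pos_of_ne_nil hmne
  omega

theorem pvCutEq (ms : List (List Char)) (hne : ∀ m ∈ ms, m ≠ []) (l : List Char) :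
    (PySem.List.min?
        ((ms.map (fun m => PySem.Chars.find l m)).filter (fun p => decide (0 ≤ p)))
        (fun p => p)).getD ((l.length : Nat) : Int)
      = ((pvMinF ms l l.length : Nat) : Int) := by
  rw [pvHits l ms hne, pvMinFold l ms]
  cases hP : ms.filterMap (fun m => pvFo m l) with
  | nil => rfl
  | cons q t =>
    have hq : q < l.length :=
      pvPosBound ms hne l q (by rw [hP]; exact List.mem_cons_self)
    rw [List.map_cons, PySem.List.min?_id_cons, Option.getD_some, pvCastFold,
      List.foldl_cons, (by omega : min l.length q = q)]

theorem pvMarkersChars :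
    pvStepKeys.map (fun v => v.toList ++ [':']) = pvMarkers.map String.toList := by decide

theorem pvMarkersGood : ∀ m ∈ pvMarkers.map String.toList, pvGood m = true := by decide

theorem pvMarkersNoOv : ∀ m1 ∈ pvMarkers.map String.toList, ∀ m2 ∈ pvMarkers.map String.toList,
    pvNoOv m1 m2 = true := by decide

theorem pvMarkersNe : ∀ m ∈ pvMarkers.map String.toList, m ≠ [] := by decide

-- ===== the tail equality: A's chain = B's single cut-and-strip =====
theorem pvTailEq (d : List Char) :
    pvStepKeys.foldl
        (fun t v => PySem.Str.strip (((PySem.Str.splitMax? t (v ++ ":") 1).getD []).headD ""))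
        (PySem.Str.strip (String.ofList d))
      = (let s := PySem.Str.strip (String.ofList d);
         let hits := (pvMarkers.map (fun m => PySem.Str.find s m)).filter (fun p => decide (0 ≤ p));
         PySem.Str.strip (PySem.Str.slice s none
           (some ((PySem.List.min? hits (fun p => p)).getD (PySem.Str.len s))))) := by
  have h1 : PySem.Str.strip (String.ofList d) = String.ofList (PySem.Chars.strip d) := by
    rw [PySem.Str.strip, String.toList_ofList]
  set l0 := PySem.Chars.strip d with hl0
  -- A side
  rw [h1, pvChainStr pvStepKeys l0, pvMarkersChars,
    pvChain (pvMarkers.map String.toList) pvMarkersGood pvMarkersNoOv l0 (pvStripIdem d)]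
  -- B side
  show _ = PySem.Str.strip (PySem.Str.slice (String.ofList l0) none (some _))
  have hfind : (fun m => PySem.Str.find (String.ofList l0) m)
      = (fun m : String => PySem.Chars.find l0 m.toList) := by
    funext m
    rw [PySem.Str.find, String.toList_ofList]
  have hlen : PySem.Str.len (String.ofList l0) = ((l0.length : Nat) : Int) := by
    rw [PySem.Str.len, String.toList_ofList]
  have hmap : pvMarkers.map (fun m : String => PySem.Chars.find l0 m.toList)
      = (pvMarkers.map String.toList).map (fun m => PySem.Chars.find l0 m) := by
    rw [List.map_map]; rfl
  rw [hfind, hlen, hmap, pvCutEq (pvMarkers.map String.toList) pvMarkersNe l0]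
  have hslice : PySem.Str.slice (String.ofList l0) none
      (some ((pvMinF (pvMarkers.map String.toList) l0 l0.length : Nat) : Int))
      = String.ofList (l0.take (pvMinF (pvMarkers.map String.toList) l0 l0.length)) := by
    rw [PySem.Str.slice, String.toList_ofList, PySem.Chars.slice_eq_listSlice,
      PySem.List.slice_to_natCast]
  rw [hslice, PySem.Str.strip, String.toList_ofList]

theorem pvFinal (g k : String) (r : Option String) (hk : k ≠ "")
    (hin : PySem.Str.isIn k g = true) :
    strip_generated_react_step g k r = strip_generated_react_step_alt g k r := by
  have hkne : k.toList ≠ [] := by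
    intro h
    apply hk
    have h2 := congrArg String.ofList h
    rwa [String.ofList_toList] at h2
  have hex : ∃ j, k.toList <+: g.toList.drop j := by
    rw [PySem.Chars.exists_prefix_drop_iff_isIn]
    simpa using hin
  cases hfo : pvFo k.toList g.toList with
  | none =>
    obtain ⟨j, hj⟩ := hex
    exact absurd hj ((pvFo_eq_none_iff k.toList hkne g.toList).mp hfo j)
  | some p =>
    -- B side: the header find and slice
    have hfindg : PySem.Str.find g k = (p : Int) := by
      rw [PySem.Str.find]; exact pvFind_some k.toList g.toList hkne p hfo
    have hsliceg : PySem.Str.slice g (some ((p : Int) + PySem.Str.len k)) none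
        = String.ofList (g.toList.drop (p + k.toList.length)) := by
      have hcast : (p : Int) + PySem.Str.len k = ((p + k.toList.length : Nat) : Int) := by
        rw [PySem.Str.len]; push_cast; ring
      rw [hcast, PySem.Str.slice, PySem.Chars.slice_eq_listSlice, PySem.List.slice_from_natCast]
    rw [strip_generated_react_step_alt]
    simp only [hfindg, hsliceg]
    rw [if_neg (by omega : ¬ ((p : Int) < 0))]
    -- A side: split with maxsplit 1
    rw [strip_generated_react_step,
      PySem.Str.splitMax?, PySem.Chars.splitMax?,
      if_neg (by simpa [List.isEmpty_iff] using hkne),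
      pvSplit1 g.toList k.toList hkne, hfo]
    simp only [Option.map_some, List.map_cons, List.map_nil, List.cons_append, List.nil_append,
      List.getElem?_cons_succ, List.getElem?_cons_zero]
    exact pvTailEq _

-- ===== VERDICT (by name: the statement is the Claim_ definition above) =====
theorem strip_generated_react_step_spec : Claim_equal_strip_generated_react_step := by
  intro generation start_key runon_str _ hpre
  show strip_generated_react_step generation start_key runon_str
      = strip_generated_react_step_alt generation start_key runon_str
  exact pvFinal generation start_key runon_str hpre.1 hpre.2
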